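-- pv_equiv track=rewrite | github.com/oskomorokhov/python | study/dcp/22.py | original_sentence
-- ===== SOURCE A (Python) =====
-- def original_sentence(words: set = set(), sentence: str = "") -> list:
--
--     result = []
--     start = 0
--     pivot = 1
--
--     while pivot <= len(sentence):
--         if sentence[start:pivot] in words:
--             result.append(sentence[start:pivot])
--             start = pivot
--         pivot += 1
--
--     return result
-- ===== SOURCE B (Python) =====
-- def original_sentence(words: set = set(), sentence: str = "") -> list:
--     # Precompute every non-empty prefix of every word; scan once with a growing
--     # chunk and stop as soon as the chunk can no longer start any word.
--     prefixes = {w[:i] for w in words for i in range(1, len(w) + 1)}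
--     result = []
--     chunk = ""
--     for ch in sentence:
--         chunk += ch
--         if chunk not in prefixes:
--             return result
--         if chunk in words:
--             result.append(chunk)
--             chunk = ""
--     return result
-- ===== Notes on version B (the rewrite author's own statement) =====
-- stated objective: alternative
-- what changed: B precomputes the set of every non-empty prefix of every word once, then makes a single character-by-character pass accumulating a chunk, emitting it when it is a word and stopping early the moment the chunk is no longer a prefix of any word; A instead scans every pivot index to the end, re-slicing the sentence and testing set membership at each step.
import Mathlib
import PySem

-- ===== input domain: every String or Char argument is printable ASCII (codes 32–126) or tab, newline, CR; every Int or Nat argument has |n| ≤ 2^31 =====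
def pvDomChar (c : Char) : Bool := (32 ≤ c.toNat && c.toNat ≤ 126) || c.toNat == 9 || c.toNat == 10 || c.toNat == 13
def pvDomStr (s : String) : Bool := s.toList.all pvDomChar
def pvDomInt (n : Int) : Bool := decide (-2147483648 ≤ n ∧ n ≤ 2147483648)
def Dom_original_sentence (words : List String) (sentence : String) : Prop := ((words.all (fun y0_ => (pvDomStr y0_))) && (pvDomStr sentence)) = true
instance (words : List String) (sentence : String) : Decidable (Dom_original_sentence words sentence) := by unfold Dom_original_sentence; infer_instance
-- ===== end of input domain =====

-- B precomputes the set of all non-empty word prefixes and scans the sentence once,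
-- stopping as soon as the current chunk can no longer start any word (same return value as A).


-- ===== PORT A =====
-- while pivot <= len(sentence): if sentence[start:pivot] in words: append; start = pivot; pivot += 1
def origALoop (words : List String) (sentence : String) (result : List String) (start pivot : Int) : List String :=
  if pivot ≤ PySem.Str.len sentence then
    let chunk := PySem.Str.slice sentence (some start) (some pivot)
    if PySem.Set.contains words chunk then
      origALoop words sentence (result ++ [chunk]) pivot (pivot + 1)
    else
      origALoop words sentence result start (pivot + 1)
  else result
termination_by (PySem.Str.len sentence + 1 - pivot).toNat
decreasing_by all_goals omega

def original_sentence (words : List String) (sentence : String) : List String :=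
  origALoop words sentence [] 0 1

-- ===== PORT B =====
-- prefixes = {w[:i] for w in words for i in range(1, len(w)+1)}
def origBPrefixes (words : List String) : PySem.Set String :=
  PySem.Set.ofList (words.flatMap (fun w =>
    (PySem.List.pyRange 1 (PySem.Str.len w + 1) 1).map (fun i =>
      PySem.Str.slice w (some 0) (some i))))

-- one pass over the characters; chunk is the pending substring (Python: chunk += ch)
def origBLoop (words : List String) (prefixes : PySem.Set String)
    (result : List String) (chunk : List Char) : List Char → List String
  | [] => result
  | c :: rest =>
    if PySem.Set.contains prefixes (String.ofList (chunk ++ [c])) = false then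
      result
    else if PySem.Set.contains words (String.ofList (chunk ++ [c])) then
      origBLoop words prefixes (result ++ [String.ofList (chunk ++ [c])]) [] rest
    else
      origBLoop words prefixes result (chunk ++ [c]) rest

def original_sentence_alt (words : List String) (sentence : String) : List String :=
  origBLoop words (origBPrefixes words) [] [] sentence.toList

-- ===== PRECONDITION & SPEC =====
def Spec_original_sentence (words : List String) (sentence : String) (out : List String) : Prop := out = original_sentence_alt words sentence
instance (words : List String) (sentence : String) (out : List String) : Decidable (Spec_original_sentence words sentence out) := by unfold Spec_original_sentence; infer_instance

-- ===== CLAIM (what is proved, stated in full; the proofs are below) =====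
def Claim_equal_original_sentence : Prop := ∀ (words : List String) (sentence : String), Dom_original_sentence words sentence → Spec_original_sentence words sentence (original_sentence words sentence)

-- ===== LEMMAS AND PROOFS =====

lemma str_toList_inj {s t : String} (h : s.toList = t.toList) : s = t := by
  rw [← String.ofList_toList (s := s), ← String.ofList_toList (s := t), h]

-- membership in the prefix set, characterised
lemma contains_origBPrefixes (words : List String) (x : String) :
    PySem.Set.contains (origBPrefixes words) x = true ↔
      ∃ w ∈ words, ∃ i : Int, 1 ≤ i ∧ i < PySem.Str.len w + 1 ∧
        x = PySem.Str.slice w (some 0) (some i) := by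
  rw [origBPrefixes, PySem.Set.contains_iff, PySem.Set.mem_ofList]
  simp only [List.mem_flatMap, List.mem_map, PySem.List.mem_pyRange_one]
  constructor
  · rintro ⟨w, hw, i, hi, rfl⟩
    exact ⟨w, hw, i, hi.1, hi.2, rfl⟩
  · rintro ⟨w, hw, i, h1, h2, rfl⟩
    exact ⟨w, hw, i, ⟨h1, h2⟩, rfl⟩

-- a word in the set is one of its own prefixes
lemma contains_prefixes_of_words (words : List String) (l : List Char) (hl : l ≠ [])
    (hw : PySem.Set.contains words (String.ofList l) = true) :
    PySem.Set.contains (origBPrefixes words) (String.ofList l) = true := by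
  rw [contains_origBPrefixes]
  refine ⟨String.ofList l, (PySem.Set.contains_iff words _).mp hw, (l.length : Int), ?_, ?_, ?_⟩
  · have : 0 < l.length := List.length_pos_iff.mpr hl
    exact_mod_cast this
  · rw [PySem.Str.len_eq, String.toList_ofList]; omega
  · apply str_toList_inj
    rw [PySem.Str.toList_slice, PySem.Chars.slice_eq_listSlice, String.toList_ofList,
      PySem.List.slice_toNat _ (by omega) (by positivity)]
    simp

-- if no future chunk is in words, A's loop returns result unchanged
lemma aloop_no_match (words : List String) (sentence : String) :
    ∀ (fuel : Nat) (result : List String) (start pivot : Int),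
      fuel = (PySem.Str.len sentence + 1 - pivot).toNat →
      (∀ q : Int, pivot ≤ q → q ≤ PySem.Str.len sentence →
        PySem.Set.contains words (PySem.Str.slice sentence (some start) (some q)) = false) →
      origALoop words sentence result start pivot = result := by
  intro fuel
  induction fuel with
  | zero =>
    intro result start pivot hf hq
    rw [origALoop, if_neg (by omega)]
  | succ k ih =>
    intro result start pivot hf hq
    rw [origALoop]
    by_cases hp : pivot ≤ PySem.Str.len sentence
    · rw [if_pos hp]
      simp only [hq pivot le_rfl hp, if_false, Bool.false_eq_true]
      exact ih result start (pivot + 1) (by omega) (fun q h1 h2 => hq q (by omega) h2)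
    · rw [if_neg hp]

-- taking one more character extends the chunk
lemma take_chunk_succ (cs : List Char) (start p : Nat) (hsp : start ≤ p) (hp : p < cs.length) :
    (cs.drop start).take (p - start) ++ [cs[p]] = (cs.drop start).take (p + 1 - start) := by
  have h1 : p + 1 - start = (p - start) + 1 := by omega
  rw [h1, List.take_add_one]
  have h2 : (cs.drop start)[p - start]? = some cs[p] := by
    rw [List.getElem?_drop]
    rw [List.getElem?_eq_getElem (by omega)]
    congr 1
    congr 1
    omega
  rw [h2]
  rfl

-- the chunk A slices equals the chunk B accumulates
lemma slice_chunk (sentence : String) (start p : Nat) :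
    PySem.Str.slice sentence (some (start : Int)) (some ((p : Int) + 1)) =
      String.ofList ((sentence.toList.drop start).take (p + 1 - start)) := by
  apply str_toList_inj
  rw [PySem.Str.toList_slice, PySem.Chars.slice_eq_listSlice, String.toList_ofList]
  have : ((p : Int) + 1) = ((p + 1 : Nat) : Int) := by push_cast; ring
  rw [this, PySem.List.slice_natCast]

-- main loop correspondence
lemma loop_agree (words : List String) (sentence : String) :
    ∀ (k start p : Nat) (result : List String),
      start ≤ p → p + k = sentence.toList.length →
      origALoop words sentence result (start : Int) ((p : Int) + 1)
        = origBLoop words (origBPrefixes words) result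
            ((sentence.toList.drop start).take (p - start)) (sentence.toList.drop p) := by
  intro k
  induction k with
  | zero =>
    intro start p result hsp hpn
    have hd : sentence.toList.drop p = [] := List.drop_eq_nil_of_le (by omega)
    rw [hd, origBLoop, origALoop, if_neg (by rw [PySem.Str.len_eq]; omega)]
  | succ k ih =>
    intro start p result hsp hpn
    have hp : p < sentence.toList.length := by omega
    rw [List.drop_eq_getElem_cons hp, origBLoop, origALoop,
      if_pos (by rw [PySem.Str.len_eq]; omega)]
    simp only
    rw [take_chunk_succ sentence.toList start p hsp hp, ← slice_chunk sentence start p]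
    by_cases hw : PySem.Set.contains words
        (PySem.Str.slice sentence (some (start : Int)) (some ((p : Int) + 1))) = true
    · -- chunk is a word: it is in the prefix set, both append and reset
      have hpre : PySem.Set.contains (origBPrefixes words)
          (PySem.Str.slice sentence (some (start : Int)) (some ((p : Int) + 1))) = true := by
        rw [slice_chunk sentence start p]
        apply contains_prefixes_of_words
        · have : ((sentence.toList.drop start).take (p + 1 - start)).length = p + 1 - start := by
            rw [List.length_take, List.length_drop]; omega
          intro hnil
          rw [hnil] at this
          simp at this
          omega
        · rw [← slice_chunk sentence start p]; exact hw
      rw [hpre, hw]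
      simp only [Bool.true_eq_false, if_false, if_true]
      have hA : ((p : Int) + 1) = ((p + 1 : Nat) : Int) := by push_cast; ring
      have := ih (p + 1) (p + 1)
        (result ++ [PySem.Str.slice sentence (some (start : Int)) (some ((p : Int) + 1))])
        le_rfl (by omega)
      rw [hA]
      push_cast
      push_cast at this
      simpa using this
    · -- chunk is not a word
      simp only [Bool.not_eq_true] at hw
      by_cases hpre : PySem.Set.contains (origBPrefixes words)
          (PySem.Str.slice sentence (some (start : Int)) (some ((p : Int) + 1))) = true
      · -- still a viable prefix: both continue with the longer chunk
        rw [hpre, hw]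
        simp only [Bool.true_eq_false, if_false, Bool.false_eq_true]
        have := ih start (p + 1) result (by omega) (by omega)
        have hA : ((p : Int) + 1) + 1 = (((p + 1 : Nat) : Int)) + 1 := by push_cast; ring
        rw [hA]
        push_cast at this
        simpa using this
      · -- dead chunk: B stops; A never matches again
        simp only [Bool.not_eq_true] at hpre
        rw [hpre, hw]
        simp only [if_true, Bool.false_eq_true, if_false]
        apply aloop_no_match words sentence
          ((PySem.Str.len sentence + 1 - ((p : Int) + 1 + 1)).toNat) result _ _ rfl
        intro q h1 h2
        by_contra hc
        simp only [Bool.not_eq_false] at hc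
        -- the dead chunk would be a prefix of this later word
        have hq : PySem.Set.contains (origBPrefixes words)
            (PySem.Str.slice sentence (some (start : Int)) (some ((p : Int) + 1))) = true := by
          rw [contains_origBPrefixes]
          refine ⟨PySem.Str.slice sentence (some (start : Int)) (some q),
            (PySem.Set.contains_iff words _).mp hc, (p : Int) + 1 - start, by omega, ?_, ?_⟩
          · rw [PySem.Str.len_eq, PySem.Str.toList_slice, PySem.Chars.slice_eq_listSlice,
              PySem.List.slice_toNat _ (by omega) (by omega), List.length_take, List.length_drop]
            rw [PySem.Str.len_eq] at h2
            push_cast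
            omega
          · apply str_toList_inj
            rw [PySem.Str.toList_slice, PySem.Chars.slice_eq_listSlice,
              PySem.List.slice_toNat _ (by omega) (by omega),
              PySem.Str.toList_slice, PySem.Chars.slice_eq_listSlice,
              PySem.List.slice_toNat _ (by omega) (by omega)]
            rw [PySem.Str.toList_slice, PySem.Chars.slice_eq_listSlice,
              PySem.List.slice_toNat _ (by omega) (by omega)]
            simp only [Int.toNat_zero, Nat.sub_zero, List.drop_zero, List.take_take]
            rw [PySem.Str.len_eq] at h2
            congr 1
            omega
        rw [hq] at hpre
        exact absurd hpre (by simp)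

-- ===== VERDICT (by name: the statement is the Claim_ definition above) =====
theorem original_sentence_spec : Claim_equal_original_sentence := by
  intro words sentence _
  unfold Spec_original_sentence original_sentence original_sentence_alt
  have := loop_agree words sentence sentence.toList.length 0 0 [] le_rfl (by omega)
  simpa using this
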